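-- pv_equiv track=rewrite | github.com/Brian-McAteer248/CT421-Project-2-Graph-Colouring-Student-ID-20328186 | part_2.py | get_color_conflicts
-- ===== SOURCE A (Python) =====
-- def get_node_color(node, colors):
--     return colors[node]
--
-- def get_color_conflicts(adj_matrix, colors):
--     conflicts = 0
--
--     for node_1 in range(len(adj_matrix)):
--         # We only want to iterate through the row up to but not including the diagonal
--         # i.e., iterate through one half of the adjacency matrix so as not to double-count conflicts
--         # e.g. if node 1 <--> node 5 and they have the same color, we want to count that conflict
--         # once and not again for node 5 <--> node 1
--         for node_2 in range(node_1):
--             # If two nodes are adjacent, check if there is a color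
--             # conflict between them
--             if adj_matrix[node_1][node_2] == 1:
--                 if get_node_color(node_1, colors) == get_node_color(node_2, colors):
--                     conflicts += 1
--
--     return conflicts
-- ===== SOURCE B (Python) =====
-- def get_color_conflicts(adj_matrix, colors):
--     # Group nodes by color incrementally: for each node, only the earlier
--     # nodes of the SAME color can contribute a conflict, so scan just those.
--     conflicts = 0
--     seen = {}  # color -> list of earlier node indices with that color
--     for i in range(len(adj_matrix)):
--         c = colors[i]
--         for j in seen.get(c, []):
--             if adj_matrix[i][j] == 1:
--                 conflicts += 1
--         seen[c] = seen.get(c, []) + [i]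
--     return conflicts
-- ===== Notes on version B (the rewrite author's own statement) =====
-- stated objective: alternative
-- what changed: Instead of scanning the whole lower triangle of the adjacency matrix, B builds a color->earlier-nodes index incrementally and compares each node only against earlier nodes of its own color.
-- outside the precondition, e.g. on get_color_conflicts([[], [0]], []): A returns 0, B raises IndexError
import Mathlib
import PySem

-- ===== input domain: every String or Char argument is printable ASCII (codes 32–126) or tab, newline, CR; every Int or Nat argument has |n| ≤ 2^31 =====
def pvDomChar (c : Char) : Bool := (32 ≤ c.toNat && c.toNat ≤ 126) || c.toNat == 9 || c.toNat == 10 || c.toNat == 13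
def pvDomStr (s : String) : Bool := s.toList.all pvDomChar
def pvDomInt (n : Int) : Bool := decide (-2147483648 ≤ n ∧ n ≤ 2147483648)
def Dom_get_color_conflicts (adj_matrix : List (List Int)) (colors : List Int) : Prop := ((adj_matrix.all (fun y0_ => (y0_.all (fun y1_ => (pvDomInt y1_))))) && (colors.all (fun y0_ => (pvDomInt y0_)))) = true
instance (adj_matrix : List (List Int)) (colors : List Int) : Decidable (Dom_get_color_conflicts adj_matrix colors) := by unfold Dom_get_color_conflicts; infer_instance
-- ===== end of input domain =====

-- B replaces A's full lower-triangle scan by an incrementally built color→nodes index,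
-- so each node is compared only against earlier nodes of its own color (objective: alternative).

-- ===== PORT A =====
-- colors[node]; total form via pyGetD, exact under Pre_ (index in range there)
def get_node_color (node : Int) (colors : List Int) : Int :=
  PySem.List.pyGetD colors node 0

def get_color_conflicts (adj_matrix : List (List Int)) (colors : List Int) : Int :=
  (PySem.List.pyRange 0 adj_matrix.length).foldl (fun conflicts node_1 =>
    (PySem.List.pyRange 0 node_1).foldl (fun conflicts node_2 =>
      if PySem.List.pyGetD (PySem.List.pyGetD adj_matrix node_1 []) node_2 0 == 1 then
        if get_node_color node_1 colors == get_node_color node_2 colors then conflicts + 1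
        else conflicts
      else conflicts) conflicts) 0

-- ===== PORT B =====
def get_color_conflicts_alt (adj_matrix : List (List Int)) (colors : List Int) : Int :=
  ((PySem.List.pyRange 0 adj_matrix.length).foldl
    (fun (st : Int × PySem.Dict Int (List Int)) i =>
      ((st.2.getD (PySem.List.pyGetD colors i 0) []).foldl (fun acc j =>
          if PySem.List.pyGetD (PySem.List.pyGetD adj_matrix i []) j 0 == 1 then acc + 1
          else acc) st.1,
       st.2.insert (PySem.List.pyGetD colors i 0)
         (st.2.getD (PySem.List.pyGetD colors i 0) [] ++ [i])))
    (0, PySem.Dict.empty)).1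

-- ===== PRECONDITION & SPEC =====
-- Pre_ excludes inputs where an adjacency row is shorter than its index (Python A raises
-- IndexError there) and inputs where colors is shorter than adj_matrix (B reads colors[i]
-- for every node and raises IndexError, while A may still return 0 when no edge touches a
-- node whose color is missing).
def Pre_get_color_conflicts (adj_matrix : List (List Int)) (colors : List Int) : Prop :=
  (∀ p ∈ adj_matrix.zipIdx, p.2 ≤ p.1.length) ∧ adj_matrix.length ≤ colors.length

instance (adj_matrix : List (List Int)) (colors : List Int) : Decidable (Pre_get_color_conflicts adj_matrix colors) := by unfold Pre_get_color_conflicts; infer_instance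

def pvWitness_get_color_conflicts : List (List Int) × List Int := ([[0], [1, 0]], [1, 1])

def Spec_get_color_conflicts (adj_matrix : List (List Int)) (colors : List Int) (out : Int) : Prop := out = get_color_conflicts_alt adj_matrix colors
instance (adj_matrix : List (List Int)) (colors : List Int) (out : Int) : Decidable (Spec_get_color_conflicts adj_matrix colors out) := by unfold Spec_get_color_conflicts; infer_instance

-- ===== CLAIM (what is proved, stated in full; the proofs are below) =====
def Claim_equal_get_color_conflicts : Prop := ∀ (adj_matrix : List (List Int)) (colors : List Int), Dom_get_color_conflicts adj_matrix colors → Pre_get_color_conflicts adj_matrix colors → Spec_get_color_conflicts adj_matrix colors (get_color_conflicts adj_matrix colors)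

-- ===== LEMMAS AND PROOFS =====

-- A's nested if-if increment is a count of the conjunction.
theorem foldl_if_if_count (p q : Int → Bool) (l : List Int) (a : Int) :
    l.foldl (fun acc j => if p j then (if q j then acc + 1 else acc) else acc) a
      = a + (l.countP (fun j => p j && q j) : Int) := by
  rw [← PySem.List.foldl_count_if (fun j => p j && q j) l a]
  apply PySem.List.foldl_congr_mem
  intro acc j _
  by_cases hp : p j <;> by_cases hq : q j <;> simp [hp, hq]

-- Main invariant: after processing range m, B's accumulator equals A's fold and B's dict
-- maps each color c to the earlier indices having color c.
theorem main_inv (adj_matrix : List (List Int)) (colors : List Int) (m : Nat) :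
    (((List.range m).map (fun (k : Nat) => (k : Int))).foldl
        (fun (st : Int × PySem.Dict Int (List Int)) i =>
          ((st.2.getD (PySem.List.pyGetD colors i 0) []).foldl (fun acc j =>
              if PySem.List.pyGetD (PySem.List.pyGetD adj_matrix i []) j 0 == 1 then acc + 1
              else acc) st.1,
           st.2.insert (PySem.List.pyGetD colors i 0)
             (st.2.getD (PySem.List.pyGetD colors i 0) [] ++ [i])))
        (0, PySem.Dict.empty)).1
      = ((List.range m).map (fun (k : Nat) => (k : Int))).foldl (fun conflicts node_1 =>
          (PySem.List.pyRange 0 node_1).foldl (fun conflicts node_2 =>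
            if PySem.List.pyGetD (PySem.List.pyGetD adj_matrix node_1 []) node_2 0 == 1 then
              if get_node_color node_1 colors == get_node_color node_2 colors then conflicts + 1
              else conflicts
            else conflicts) conflicts) 0
    ∧ ∀ c : Int,
      ((((List.range m).map (fun (k : Nat) => (k : Int))).foldl
        (fun (st : Int × PySem.Dict Int (List Int)) i =>
          ((st.2.getD (PySem.List.pyGetD colors i 0) []).foldl (fun acc j =>
              if PySem.List.pyGetD (PySem.List.pyGetD adj_matrix i []) j 0 == 1 then acc + 1
              else acc) st.1,
           st.2.insert (PySem.List.pyGetD colors i 0)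
             (st.2.getD (PySem.List.pyGetD colors i 0) [] ++ [i])))
        (0, PySem.Dict.empty)).2).getD c []
        = ((List.range m).map (fun (k : Nat) => (k : Int))).filter
            (fun j => PySem.List.pyGetD colors j 0 == c) := by
  induction m with
  | zero => constructor <;> simp
  | succ m ih =>
    obtain ⟨ih1, ih2⟩ := ih
    rw [List.range_succ]
    simp only [List.map_append, List.map_cons, List.map_nil, List.foldl_append, List.foldl_cons,
      List.foldl_nil, List.filter_append]
    refine ⟨?_, ?_⟩
    · rw [ih1, ih2, PySem.List.pyRange_zero_nat m]
      rw [PySem.List.foldl_count_if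
        (fun j => PySem.List.pyGetD (PySem.List.pyGetD adj_matrix (m : Int) []) j 0 == 1)]
      rw [List.countP_filter]
      rw [foldl_if_if_count
        (fun j => PySem.List.pyGetD (PySem.List.pyGetD adj_matrix (m : Int) []) j 0 == 1)
        (fun j => get_node_color (m : Int) colors == get_node_color j colors)]
      congr 2
      apply List.countP_congr
      intro j _
      simp only [get_node_color, Bool.and_eq_true, beq_iff_eq]
      constructor <;> rintro ⟨h1, h2⟩ <;> exact ⟨h1, h2.symm⟩
    · intro c
      rw [PySem.Dict.getD_insert]
      by_cases hc : c = PySem.List.pyGetD colors (m : Int) 0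
      · rw [if_pos hc, ih2]
        simp [hc]
      · rw [if_neg hc, ih2 c]
        have hbe : ¬ (colors[m]?.getD 0 = c) := by
          intro h
          apply hc
          rw [← h]
          simp
        simp [hbe]

-- ===== VERDICT (by name: the statement is the Claim_ definition above) =====
theorem get_color_conflicts_spec : Claim_equal_get_color_conflicts := by
  intro adj_matrix colors _ _
  unfold Spec_get_color_conflicts get_color_conflicts get_color_conflicts_alt
  rw [PySem.List.pyRange_zero_nat adj_matrix.length]
  exact ((main_inv adj_matrix colors adj_matrix.length).1).symm
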